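-- pv_equiv track=rewrite | github.com/VatsalOjha/CurProject | Project/termProject.py | commentTypes
-- ===== SOURCE A (Python) =====
-- def commentTypes(commentLines, lines):
-- 	commentTypes = []
-- 	for comment in commentLines:
-- 		if "print" in lines[comment]:
-- 			commentTypes.append("Explain what is being printed on line ")
-- 		elif "return" in lines[comment]:
-- 			commentTypes.append("Explain what is being returned on line ")
-- 		elif "def" in lines[comment]:
-- 			commentTypes.append("Explain the function on line ")
-- 		elif "for" in lines[comment] or "while" in lines[comment]:
-- 			commentTypes.append("Explain the loop on line ")
-- 		else:
-- 			commentTypes.append("Comment on line ")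
-- 	return commentTypes
-- ===== SOURCE B (Python) =====
-- _KEYS = [["print"], ["return"], ["def"], ["for", "while"]]
-- _MSGS = [
--     "Explain what is being printed on line ",
--     "Explain what is being returned on line ",
--     "Explain the function on line ",
--     "Explain the loop on line ",
--     "Comment on line ",
-- ]
--
-- def _label(line):
--     # collect the priorities of ALL matching rule groups, then take the smallest
--     hits = [i for i, keys in enumerate(_KEYS) if any(k in line for k in keys)]
--     return _MSGS[min(hits)] if hits else _MSGS[4]
--
-- def commentTypes(commentLines, lines):
--     # stage 1: label every source line once; stage 2: index the label table
--     labels = [_label(line) for line in lines]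
--     return [labels[c] for c in commentLines]
-- ===== Notes on version B (the rewrite author's own statement) =====
-- stated objective: alternative
-- what changed: Instead of an early-exit if/elif chain per comment, B pre-labels every source line in a first pass by collecting ALL matching keyword groups and taking the minimum priority into a message table, then a second pass merely indexes that label table by comment index.
import Mathlib
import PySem

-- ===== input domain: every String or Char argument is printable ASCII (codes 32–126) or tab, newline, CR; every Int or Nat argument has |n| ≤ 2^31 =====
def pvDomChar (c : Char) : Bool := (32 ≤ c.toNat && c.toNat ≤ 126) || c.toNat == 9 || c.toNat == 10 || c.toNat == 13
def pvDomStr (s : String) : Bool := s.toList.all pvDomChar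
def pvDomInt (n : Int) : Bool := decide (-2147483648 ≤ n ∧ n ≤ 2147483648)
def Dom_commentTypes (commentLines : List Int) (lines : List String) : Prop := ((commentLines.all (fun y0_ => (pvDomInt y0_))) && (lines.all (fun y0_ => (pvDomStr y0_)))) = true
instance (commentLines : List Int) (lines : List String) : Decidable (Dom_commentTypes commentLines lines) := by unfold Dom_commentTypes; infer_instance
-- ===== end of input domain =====

-- B pre-labels every source line once (all matching keyword groups, minimum priority into a
-- message table) and then only indexes that label table per comment, instead of A's per-comment
-- if/elif chain (alternative decomposition; no speed claim).


-- ===== PORT A =====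
-- literal transliteration of A's for-loop with its if/elif chain; lines[comment] is
-- PySem.List.pyGetD, exact under Pre_ (index in range).
def commentTypes (commentLines : List Int) (lines : List String) : List String :=
  commentLines.foldl (fun acc comment =>
    let line := PySem.List.pyGetD lines comment ""
    if PySem.Str.isIn "print" line then
      acc ++ ["Explain what is being printed on line "]
    else if PySem.Str.isIn "return" line then
      acc ++ ["Explain what is being returned on line "]
    else if PySem.Str.isIn "def" line then
      acc ++ ["Explain the function on line "]
    else if PySem.Str.isIn "for" line || PySem.Str.isIn "while" line then
      acc ++ ["Explain the loop on line "]
    else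
      acc ++ ["Comment on line "]) []

-- ===== PORT B =====
def pvKeys : List (List String) := [["print"], ["return"], ["def"], ["for", "while"]]
def pvMsgs : List String :=
  [ "Explain what is being printed on line "
  , "Explain what is being returned on line "
  , "Explain the function on line "
  , "Explain the loop on line "
  , "Comment on line " ]

-- Source B's _label: priorities of ALL matching keyword groups, minimum indexes the message table
def pvLabel (line : String) : String :=
  let hits := ((PySem.List.enumerate pvKeys 0).filter
      (fun p => p.2.any (fun k => PySem.Str.isIn k line))).map (fun p => p.1)
  match PySem.List.min? hits (fun x => x) with
  | some i => PySem.List.pyGetD pvMsgs i ""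
  | none => PySem.List.pyGetD pvMsgs 4 ""

def commentTypes_alt (commentLines : List Int) (lines : List String) : List String :=
  let labels := lines.map pvLabel
  commentLines.map (fun c => PySem.List.pyGetD labels c "")

-- ===== PRECONDITION & SPEC =====
-- Pre_ excludes exactly the inputs where A raises IndexError: some comment index out of range.
def Pre_commentTypes (commentLines : List Int) (lines : List String) : Prop :=
  ∀ c ∈ commentLines, PySem.Raise.InRange lines.length c
instance (commentLines : List Int) (lines : List String) : Decidable (Pre_commentTypes commentLines lines) := by unfold Pre_commentTypes; infer_instance
def pvWitness_commentTypes : List Int × List String := ([0, -1, 1], ["print x", "for i in range(3):"])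

def Spec_commentTypes (commentLines : List Int) (lines : List String) (out : List String) : Prop := out = commentTypes_alt commentLines lines
instance (commentLines : List Int) (lines : List String) (out : List String) : Decidable (Spec_commentTypes commentLines lines out) := by unfold Spec_commentTypes; infer_instance

-- ===== CLAIM =====
def Claim_equal_commentTypes : Prop := ∀ (commentLines : List Int) (lines : List String), Dom_commentTypes commentLines lines → Pre_commentTypes commentLines lines → Spec_commentTypes commentLines lines (commentTypes commentLines lines)

-- ===== LEMMAS AND PROOFS =====

-- pointwise: B's min-priority label equals A's if/elif chain on the same line
lemma label_eq_chain (line : String) :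
    pvLabel line =
      (if PySem.Str.isIn "print" line then "Explain what is being printed on line "
       else if PySem.Str.isIn "return" line then "Explain what is being returned on line "
       else if PySem.Str.isIn "def" line then "Explain the function on line "
       else if PySem.Str.isIn "for" line || PySem.Str.isIn "while" line then "Explain the loop on line "
       else "Comment on line ") := by
  unfold pvLabel pvKeys pvMsgs
  simp only [PySem.Str.isIn_eq]
  rcases Bool.eq_false_or_eq_true (PySem.Chars.isIn (['p','r','i','n','t'] : List Char) line.toList) with h1 | h1 <;>
  rcases Bool.eq_false_or_eq_true (PySem.Chars.isIn (['r','e','t','u','r','n'] : List Char) line.toList) with h2 | h2 <;>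
  rcases Bool.eq_false_or_eq_true (PySem.Chars.isIn (['d','e','f'] : List Char) line.toList) with h3 | h3 <;>
  rcases Bool.eq_false_or_eq_true (PySem.Chars.isIn (['f','o','r'] : List Char) line.toList) with h4 | h4 <;>
  rcases Bool.eq_false_or_eq_true (PySem.Chars.isIn (['w','h','i','l','e'] : List Char) line.toList) with h5 | h5 <;>
    simp [h1, h2, h3, h4, h5, PySem.List.enumerate, PySem.List.min?, PySem.List.pyGetD]

-- indexing a mapped list agrees with mapping the indexed element, for an in-range index
lemma pyGetD_map_of_inRange (f : String → String) (xs : List String) (c : Int) (d d' : String)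
    (h : PySem.Raise.InRange xs.length c) :
    PySem.List.pyGetD (xs.map f) c d = f (PySem.List.pyGetD xs c d') := by
  by_cases hc : 0 ≤ c
  · have hlt : c < (xs.length : Int) := by
      unfold PySem.Raise.InRange at h; omega
    rw [PySem.List.pyGetD_eq_getElem (xs.map f) d hc (by simpa using hlt),
        PySem.List.pyGetD_eq_getElem xs d' hc hlt]
    simp [List.getElem_map]
  case neg =>
    have hc' : c < 0 := by omega
    have hk : c = -(((-c).toNat : Nat) : Int) := by omega
    have h1 : 0 < (-c).toNat := by omega
    have h2 : (-c).toNat ≤ xs.length := by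
      unfold PySem.Raise.InRange at h; omega
    rw [hk, PySem.List.pyGetD_neg_natCast _ _ _ h1 (by simpa using h2),
        PySem.List.pyGetD_neg_natCast _ _ _ h1 h2]
    simp [List.getElem_map]

-- A's foldl chain builds exactly the map of B's label over the fetched lines
lemma foldl_chain_eq_map (commentLines : List Int) (lines : List String) (acc : List String) :
    commentLines.foldl (fun acc comment =>
      let line := PySem.List.pyGetD lines comment ""
      if PySem.Str.isIn "print" line then
        acc ++ ["Explain what is being printed on line "]
      else if PySem.Str.isIn "return" line then
        acc ++ ["Explain what is being returned on line "]
      else if PySem.Str.isIn "def" line then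
        acc ++ ["Explain the function on line "]
      else if PySem.Str.isIn "for" line || PySem.Str.isIn "while" line then
        acc ++ ["Explain the loop on line "]
      else
        acc ++ ["Comment on line "]) acc
    = acc ++ commentLines.map (fun comment => pvLabel (PySem.List.pyGetD lines comment "")) := by
  induction commentLines generalizing acc with
  | nil => simp
  | cons c cs ih =>
    simp only [List.foldl_cons, List.map_cons]
    rw [ih, label_eq_chain]
    split_ifs <;> simp

-- ===== VERDICT =====
theorem commentTypes_spec : Claim_equal_commentTypes := by
  intro commentLines lines _ hpre
  unfold Spec_commentTypes commentTypes commentTypes_alt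
  rw [foldl_chain_eq_map commentLines lines []]
  simp only [List.nil_append]
  exact List.map_congr_left (fun c hc =>
    (pyGetD_map_of_inRange pvLabel lines c "" "" (hpre c hc)).symm)
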